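-- pv_equiv track=rewrite | github.com/bobowedge/advent-of-code-2022 | day17.py | down_rock_step
-- ===== SOURCE A (Python) =====
-- def down_rock_step(rock, filled_spots: list):
--     new_rock = []
--     for (y, value) in rock:
--         new_y = y - 1
--         if new_y < len(filled_spots):
--             filled = filled_spots[new_y]
--             if filled & value:
--                 return rock, True
--         new_rock.append((new_y, value))
--     return new_rock, False
-- ===== SOURCE B (Python) =====
-- def down_rock_step(rock, filled_spots: list):
--     # Shift every cell down once, then group the shifted cells by destination row
--     # in a dict; test each distinct row against filled_spots once.
--     shifted = [(y - 1, value) for (y, value) in rock]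
--     by_row = {}
--     for (row, value) in shifted:
--         by_row[row] = by_row.get(row, []) + [value]
--     for row, values in by_row.items():
--         if row < len(filled_spots):
--             filled = filled_spots[row]
--             if any(filled & v for v in values):
--                 return rock, True
--     return shifted, False
-- ===== Notes on version B (the rewrite author's own statement) =====
-- stated objective: alternative
-- what changed: Replaces A's single accumulate-and-early-return pass with a shift-then-group algorithm: B shifts all cells once, groups the shifted cells by destination row in a dict, tests each distinct row against filled_spots once (any() over that row's masks), and returns the prebuilt shifted list when no row collides.
import Mathlib
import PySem

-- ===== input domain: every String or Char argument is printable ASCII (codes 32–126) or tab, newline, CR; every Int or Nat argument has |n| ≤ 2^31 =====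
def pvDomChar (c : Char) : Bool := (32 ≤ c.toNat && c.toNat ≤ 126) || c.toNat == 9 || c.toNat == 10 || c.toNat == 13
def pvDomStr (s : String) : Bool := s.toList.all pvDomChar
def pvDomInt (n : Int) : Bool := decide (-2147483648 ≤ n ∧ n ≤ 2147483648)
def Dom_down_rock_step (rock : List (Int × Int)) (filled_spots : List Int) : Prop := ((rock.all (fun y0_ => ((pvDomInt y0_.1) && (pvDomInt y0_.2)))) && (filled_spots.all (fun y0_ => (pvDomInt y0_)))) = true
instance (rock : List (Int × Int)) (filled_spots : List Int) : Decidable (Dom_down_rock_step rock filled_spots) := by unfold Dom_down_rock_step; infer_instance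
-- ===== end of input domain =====

-- B replaces A's accumulate-and-early-return pass by shift-then-group: shift all cells once,
-- group the shifted cells by destination row in a dict, test each distinct row once (objective: alternative).

-- ===== PORT A =====
-- A's loop: carries the accumulator new_rock, early-returns (rock, True) on collision.
def downRockGoA (orig : List (Int × Int)) (filled_spots : List Int) :
    List (Int × Int) → List (Int × Int) → (List (Int × Int)) × Bool
  | [], new_rock => (new_rock, false)
  | (y, value) :: rest, new_rock =>
    let new_y := y - 1
    if new_y < (filled_spots.length : Int) then
      let filled := PySem.List.pyGetD filled_spots new_y 0   -- exact under Pre_ (index in range)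
      if PySem.Int.band filled value ≠ 0 then (orig, true)
      else downRockGoA orig filled_spots rest (new_rock ++ [(new_y, value)])
    else downRockGoA orig filled_spots rest (new_rock ++ [(new_y, value)])

def down_rock_step (rock : List (Int × Int)) (filled_spots : List Int) : (List (Int × Int)) × Bool :=
  downRockGoA rock filled_spots rock []

-- ===== PORT B =====
-- B's grouping loop: by_row[row] = by_row.get(row, []) + [value], over the shifted cells.
def downRockGroupB (shifted : List (Int × Int)) : PySem.Dict Int (List Int) :=
  shifted.foldl (fun d p => d.modify p.1 ([] : List Int) (fun l => l ++ [p.2])) PySem.Dict.empty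

-- B's row-check loop over the dict's items, early-returning true on a colliding row.
def downRockCheckB (filled_spots : List Int) : List (Int × List Int) → Bool
  | [] => false
  | (row, values) :: rest =>
    if row < (filled_spots.length : Int) then
      let filled := PySem.List.pyGetD filled_spots row 0   -- exact under Pre_ (index in range)
      if values.any (fun v => PySem.Int.band filled v ≠ 0) then true
      else downRockCheckB filled_spots rest
    else downRockCheckB filled_spots rest

def down_rock_step_alt (rock : List (Int × Int)) (filled_spots : List Int) : (List (Int × Int)) × Bool :=
  if downRockCheckB filled_spots (downRockGroupB (rock.map (fun p => (p.1 - 1, p.2)))).items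
  then (rock, true)
  else (rock.map (fun p => (p.1 - 1, p.2)), false)

-- ===== PRECONDITION & SPEC =====
-- Pre_ excludes inputs where a rock cell with new_y = y-1 < -len(filled_spots) would make
-- filled_spots[new_y] raise IndexError in Python; on a few of those A still returns (an earlier
-- cell already collided, so the bad index is never reached) — B returns the same value there.
def Pre_down_rock_step (rock : List (Int × Int)) (filled_spots : List Int) : Prop :=
  ∀ p ∈ rock, -(filled_spots.length : Int) ≤ p.1 - 1
instance (rock : List (Int × Int)) (filled_spots : List Int) : Decidable (Pre_down_rock_step rock filled_spots) := by unfold Pre_down_rock_step; infer_instance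

def pvWitness_down_rock_step : (List (Int × Int)) × List Int := ([(2, 1), (1, 2)], [3, 1])

def Spec_down_rock_step (rock : List (Int × Int)) (filled_spots : List Int) (out : (List (Int × Int)) × Bool) : Prop := out = down_rock_step_alt rock filled_spots
instance (rock : List (Int × Int)) (filled_spots : List Int) (out : (List (Int × Int)) × Bool) : Decidable (Spec_down_rock_step rock filled_spots out) := by unfold Spec_down_rock_step; infer_instance

-- ===== CLAIM =====
def Claim_equal_down_rock_step : Prop := ∀ (rock : List (Int × Int)) (filled_spots : List Int), Dom_down_rock_step rock filled_spots → Pre_down_rock_step rock filled_spots → Spec_down_rock_step rock filled_spots (down_rock_step rock filled_spots)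

-- ===== LEMMAS AND PROOFS =====

-- The collision predicate both programs decide, as a List.any over the shifted cells.
def pvCollide (filled_spots : List Int) (shifted : List (Int × Int)) : Bool :=
  shifted.any (fun p =>
    decide (p.1 < (filled_spots.length : Int)) &&
    decide (PySem.Int.band (PySem.List.pyGetD filled_spots p.1 0) p.2 ≠ 0))

-- A's loop equals: (orig, true) if some shifted cell collides, else (acc ++ shifted rest, false).
theorem downRockGoA_eq (filled_spots : List Int) (orig : List (Int × Int)) :
    ∀ (rest acc : List (Int × Int)),
      downRockGoA orig filled_spots rest acc =
        if pvCollide filled_spots (rest.map (fun p => (p.1 - 1, p.2))) then (orig, true)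
        else (acc ++ rest.map (fun p => (p.1 - 1, p.2)), false) := by
  intro rest
  induction rest with
  | nil => intro acc; simp [downRockGoA, pvCollide]
  | cons hd tl ih =>
    intro acc
    obtain ⟨y, value⟩ := hd
    by_cases hlt : (y - 1 : Int) < (filled_spots.length : Int)
    · by_cases hcol : PySem.Int.band (PySem.List.pyGetD filled_spots (y - 1) 0) value ≠ 0
      · have h1 : downRockGoA orig filled_spots ((y, value) :: tl) acc = (orig, true) := by
          simp [downRockGoA, hlt, hcol]
        have h2 : pvCollide filled_spots (((y, value) :: tl).map (fun p => (p.1 - 1, p.2))) = true := by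
          simp only [pvCollide, List.map_cons, List.any_cons, decide_eq_true hlt,
            decide_eq_true hcol, Bool.true_and, Bool.true_or]
        rw [h1, h2]; simp
      · have h1 : downRockGoA orig filled_spots ((y, value) :: tl) acc =
            downRockGoA orig filled_spots tl (acc ++ [(y - 1, value)]) := by
          simp [downRockGoA, hlt, hcol]
        have h2 : pvCollide filled_spots (((y, value) :: tl).map (fun p => (p.1 - 1, p.2))) =
            pvCollide filled_spots (tl.map (fun p => (p.1 - 1, p.2))) := by
          simp only [pvCollide, List.map_cons, List.any_cons, decide_eq_false hcol,
            Bool.and_false, Bool.false_or]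
        rw [h1, ih, h2]
        split_ifs <;> simp [List.append_assoc]
    · have h1 : downRockGoA orig filled_spots ((y, value) :: tl) acc =
          downRockGoA orig filled_spots tl (acc ++ [(y - 1, value)]) := by
        simp [downRockGoA, hlt]
      have h2 : pvCollide filled_spots (((y, value) :: tl).map (fun p => (p.1 - 1, p.2))) =
          pvCollide filled_spots (tl.map (fun p => (p.1 - 1, p.2))) := by
        simp only [pvCollide, List.map_cons, List.any_cons, decide_eq_false hlt,
          Bool.false_and, Bool.false_or]
      rw [h1, ih, h2]
      split_ifs <;> simp [List.append_assoc]

-- B's row-check loop is an any over the items list.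
theorem downRockCheckB_eq_any (filled_spots : List Int) :
    ∀ (items : List (Int × List Int)),
      downRockCheckB filled_spots items =
        items.any (fun q =>
          decide (q.1 < (filled_spots.length : Int)) &&
          q.2.any (fun v => decide (PySem.Int.band (PySem.List.pyGetD filled_spots q.1 0) v ≠ 0))) := by
  intro items
  induction items with
  | nil => simp [downRockCheckB]
  | cons hd tl ih =>
    obtain ⟨row, values⟩ := hd
    simp only [List.any_cons]
    by_cases hlt : (row : Int) < (filled_spots.length : Int)
    · by_cases hany : (values.any fun v =>
          decide (PySem.Int.band (PySem.List.pyGetD filled_spots row 0) v ≠ 0)) = true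
      · have h1 : downRockCheckB filled_spots ((row, values) :: tl) = true := by
          simp only [downRockCheckB, if_pos hlt]
          rw [if_pos hany]
        rw [h1, decide_eq_true hlt, Bool.true_and, hany, Bool.true_or]
      · have h1 : downRockCheckB filled_spots ((row, values) :: tl) =
            downRockCheckB filled_spots tl := by
          simp only [downRockCheckB, if_pos hlt]
          rw [if_neg hany]
        rw [h1, ih, decide_eq_true hlt, Bool.true_and,
          Bool.eq_false_iff.mpr hany, Bool.false_or]
    · have h1 : downRockCheckB filled_spots ((row, values) :: tl) =
          downRockCheckB filled_spots tl := by
        simp only [downRockCheckB, if_neg hlt]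
      rw [h1, ih, decide_eq_false hlt, Bool.false_and, Bool.false_or]

-- The grouping dict's value at key k is exactly the masks of shifted cells at row k.
theorem downRockGroupB_getD (shifted : List (Int × Int)) (k : Int) :
    (downRockGroupB shifted).getD k [] = (shifted.filter (fun p => p.1 == k)).map (·.2) := by
  simpa using PySem.Dict.getD_foldl_modify_append shifted (PySem.Dict.empty) k

theorem downRockGroupB_keys (shifted : List (Int × Int)) :
    (downRockGroupB shifted).keys = PySem.Set.ofList (shifted.map (·.1)) := by
  unfold downRockGroupB
  rw [PySem.Dict.keys_foldl_modify_key]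
  simp [PySem.Set.update_nil_left]

theorem downRockGroupB_keys_nodup (shifted : List (Int × Int)) :
    (downRockGroupB shifted).keys.Nodup := by
  rw [downRockGroupB_keys]; exact PySem.Set.nodup_ofList _

-- Checking the grouped rows finds a collision iff some shifted cell collides.
theorem checkB_eq_collide (filled_spots : List Int) (shifted : List (Int × Int)) :
    downRockCheckB filled_spots (downRockGroupB shifted).items = pvCollide filled_spots shifted := by
  rw [downRockCheckB_eq_any,
      PySem.Dict.items_eq_map_keys (downRockGroupB shifted) (downRockGroupB_keys_nodup shifted) []]
  rw [Bool.eq_iff_iff]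
  simp only [pvCollide, List.any_map, List.any_eq_true, Function.comp]
  constructor
  · rintro ⟨k, hk, hcond⟩
    rw [Bool.and_eq_true] at hcond
    obtain ⟨hlt, hany⟩ := hcond
    rw [downRockGroupB_getD] at hany
    simp only [List.any_eq_true, List.mem_map, List.mem_filter] at hany
    obtain ⟨v, ⟨p, ⟨hp, hpk⟩, hpv⟩, hband⟩ := hany
    refine ⟨p, hp, ?_⟩
    have hk' : p.1 = k := by simpa using hpk
    rw [Bool.and_eq_true, hk', hpv]
    exact ⟨hlt, hband⟩
  · rintro ⟨p, hp, hcond⟩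
    rw [Bool.and_eq_true] at hcond
    obtain ⟨hlt, hband⟩ := hcond
    refine ⟨p.1, ?_, ?_⟩
    · rw [downRockGroupB_keys, PySem.Set.mem_ofList]
      exact List.mem_map_of_mem hp
    · rw [Bool.and_eq_true, downRockGroupB_getD]
      refine ⟨hlt, ?_⟩
      simp only [List.any_eq_true, List.mem_map, List.mem_filter]
      exact ⟨p.2, ⟨p, ⟨hp, by simp⟩, rfl⟩, hband⟩

-- ===== VERDICT (by name: the statement is the Claim_ definition above) =====
theorem down_rock_step_spec : Claim_equal_down_rock_step := by
  intro rock filled_spots _ _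
  unfold Spec_down_rock_step down_rock_step down_rock_step_alt
  rw [downRockGoA_eq, checkB_eq_collide]
  split_ifs <;> simp
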